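-- pv_equiv track=rewrite | github.com/bryzZz/homework | Работа с файлами(Театр)/python/main.py | GetListOfPersonsAndPhrases
-- ===== SOURCE A (Python) =====
-- def GetListOfPersonsAndPhrases(Persons, AllList):
--   listOfPersonsAndPhrases = []
--   for person in Persons:
--     tempList = []
--     tempList.append(person)
--     for i in range(0, len(AllList)):
--       isPerson = AllList[i].split('.')[0]
--       if isPerson == person:
--         tempList.append(str(i+2) + ")" + (''.join(AllList[i].split('.', 1)[1:])[:-1]))
--     listOfPersonsAndPhrases.append(tempList)
--   return listOfPersonsAndPhrases
-- ===== SOURCE B (Python) =====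
-- def GetListOfPersonsAndPhrases(Persons, AllList):
--     groups = {}
--     for i, line in enumerate(AllList):
--         key = line.split('.')[0]
--         phrase = str(i + 2) + ")" + ''.join(line.split('.', 1)[1:])[:-1]
--         groups.setdefault(key, []).append(phrase)
--     return [[p] + groups.get(p, []) for p in Persons]
-- ===== Notes on version B (the rewrite author's own statement) =====
-- stated objective: faster
-- what changed: B replaces A's per-person rescans of AllList by one pass that groups formatted phrases into a dict keyed by the text before the first '.', then emits [person]+group for each person in Persons order.
import Mathlib
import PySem

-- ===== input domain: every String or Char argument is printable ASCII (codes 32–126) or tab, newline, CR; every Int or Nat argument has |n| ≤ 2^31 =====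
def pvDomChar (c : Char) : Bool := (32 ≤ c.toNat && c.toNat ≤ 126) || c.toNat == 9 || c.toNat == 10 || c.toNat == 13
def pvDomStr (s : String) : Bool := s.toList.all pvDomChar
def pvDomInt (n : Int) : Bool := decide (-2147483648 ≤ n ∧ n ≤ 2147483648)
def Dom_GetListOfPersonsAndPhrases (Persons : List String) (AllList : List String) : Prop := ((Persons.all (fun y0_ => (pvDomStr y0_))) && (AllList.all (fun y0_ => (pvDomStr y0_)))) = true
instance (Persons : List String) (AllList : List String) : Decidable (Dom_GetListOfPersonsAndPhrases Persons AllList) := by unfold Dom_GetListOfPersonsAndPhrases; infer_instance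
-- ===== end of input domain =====

-- B is faster: one grouping pass over AllList plus one pass over Persons, instead of A's rescan of AllList for every person.
-- ===== PORT A =====
-- shared helpers: the key AllList[i].split('.')[0] and the formatted phrase str(i+2)+")"+''.join(AllList[i].split('.',1)[1:])[:-1]
-- (both Pythons contain these exact expressions verbatim)
def pvKey (line : String) : String :=
  PySem.List.pyGetD ((PySem.Str.split? line ".").getD []) 0 ""
def pvPhrase (i : Int) (line : String) : String :=
  PySem.Int.toStr (i + 2) ++ ")" ++
    PySem.Str.slice (PySem.Str.join "" (PySem.List.slice ((PySem.Str.splitMax? line "." 1).getD []) (some 1) none)) none (some (-1))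

def GetListOfPersonsAndPhrases (Persons : List String) (AllList : List String) : List (List String) :=
  Persons.foldl (fun listOfPersonsAndPhrases person =>
    let tempList : List String := [person]
    let tempList := (PySem.List.pyRange 0 AllList.length 1).foldl (fun t i =>
      if pvKey (PySem.List.pyGetD AllList i "") == person then
        t ++ [pvPhrase i (PySem.List.pyGetD AllList i "")]
      else t) tempList
    listOfPersonsAndPhrases ++ [tempList]) []

-- ===== PORT B =====
def GetListOfPersonsAndPhrases_alt (Persons : List String) (AllList : List String) : List (List String) :=
  let groups := (PySem.List.enumerate AllList 0).foldl
    (fun d p => d.modify (pvKey p.2) [] (· ++ [pvPhrase p.1 p.2])) PySem.Dict.empty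
  Persons.map (fun p => [p] ++ groups.getD p [])

-- ===== PRECONDITION & SPEC =====
def Spec_GetListOfPersonsAndPhrases (Persons : List String) (AllList : List String) (out : List (List String)) : Prop := out = GetListOfPersonsAndPhrases_alt Persons AllList
instance (Persons : List String) (AllList : List String) (out : List (List String)) : Decidable (Spec_GetListOfPersonsAndPhrases Persons AllList out) := by unfold Spec_GetListOfPersonsAndPhrases; infer_instance

-- ===== CLAIM (what is proved, stated in full; the proofs are below) =====
def Claim_equal_GetListOfPersonsAndPhrases : Prop := ∀ (Persons : List String) (AllList : List String), Dom_GetListOfPersonsAndPhrases Persons AllList → Spec_GetListOfPersonsAndPhrases Persons AllList (GetListOfPersonsAndPhrases Persons AllList)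

-- ===== LEMMAS AND PROOFS =====

-- ===== VERDICT (by name: the statement is the Claim_ definition above) =====
theorem GetListOfPersonsAndPhrases_spec : Claim_equal_GetListOfPersonsAndPhrases := by
  intro Persons AllList _
  unfold Spec_GetListOfPersonsAndPhrases GetListOfPersonsAndPhrases GetListOfPersonsAndPhrases_alt
  rw [PySem.List.foldl_append_singleton_eq_map]
  simp only [List.nil_append]
  apply List.map_congr_left
  intro person _
  have h1 : PySem.List.pyRange 0 (AllList.length : Int) 1
      = (PySem.List.enumerate AllList 0).map (fun q => q.1) := by
    rw [PySem.List.enumerate_eq_map_pyRange AllList ""]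
    simp [List.map_map, Function.comp_def]
  rw [h1, List.foldl_map]
  have h2 : ∀ q ∈ PySem.List.enumerate AllList 0, PySem.List.pyGetD AllList q.1 "" = q.2 := by
    intro q hq
    rcases (PySem.List.mem_enumerate_iff ..).1 hq with ⟨k, hk, rfl⟩
    simp [PySem.List.pyGetD_natCast, List.getD_eq_getElem?_getD, hk]
  have h4 : (PySem.List.enumerate AllList 0).foldl
        (fun t q => if pvKey (PySem.List.pyGetD AllList q.1 "") == person then
          t ++ [pvPhrase q.1 (PySem.List.pyGetD AllList q.1 "")] else t) [person]
      = (PySem.List.enumerate AllList 0).foldl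
        (fun t q => if pvKey q.2 == person then t ++ [pvPhrase q.1 q.2] else t) [person] :=
    by apply PySem.List.foldl_congr_mem; intro acc q hq; rw [h2 q hq]
  rw [h4, PySem.List.foldl_append_if]
  have h3 : (PySem.List.enumerate AllList 0).foldl
        (fun d p => d.modify (pvKey p.2) [] (· ++ [pvPhrase p.1 p.2])) PySem.Dict.empty
      = ((PySem.List.enumerate AllList 0).map (fun q => (pvKey q.2, pvPhrase q.1 q.2))).foldl
        (fun d p => d.modify p.1 [] (· ++ [p.2])) PySem.Dict.empty := by
    rw [List.foldl_map]
  rw [h3, PySem.Dict.getD_foldl_modify_append]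
  simp [List.filter_map, List.map_map, Function.comp_def]
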